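-- pv_equiv track=rewrite | github.com/mlldzi/EXAMPLE | backend/app/utils/pdf_parser.py | split_on_semicolon
-- ===== SOURCE A (Python) =====
-- def split_on_semicolon(paragraphs: list[str]) -> list[str]:
--     """Разделяет текст по точкам с запятой и маркированным спискам."""
--     new_paragraphs = []
--
--     for para in paragraphs:
--         new_para = []
--         in_brackets = False
--
--         i = 0
--         while i < len(para):
--             if para[i] == '(':
--                 in_brackets = True
--             elif para[i] == ')':
--                 in_brackets = False
--
--             if para[i] == ';' and i < len(para) - 1 and not in_brackets:
--                 new_para.append('\n')
--             elif para[i:i + 4] == ": - ":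
--                 new_para.append(": \n-")
--                 i += 3
--                 continue
--             else:
--                 new_para.append(para[i])
--
--             i += 1
--
--         new_paragraphs.append(''.join(new_para))
--
--     stripped_paragraphs = []
--
--     for paragraph in new_paragraphs:
--         for para in paragraph.split('\n'):
--             stripped_paragraphs.append(para)
--
--     return stripped_paragraphs
-- ===== SOURCE B (Python) =====
-- def split_on_semicolon(paragraphs: list[str]) -> list[str]:
--     """Index-based two-phase version: scan each paragraph once to record cut
--     positions (end of one segment, start of the next), then emit the segments
--     as contiguous slices of the original paragraph."""
--     out = []
--     for para in paragraphs:
--         n = len(para)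
--         starts = [0]
--         ends = []
--         in_brackets = False
--         i = 0
--         while i < n:
--             c = para[i]
--             if c == '(':
--                 in_brackets = True
--             elif c == ')':
--                 in_brackets = False
--             if c == ';' and i < n - 1 and not in_brackets:
--                 ends.append(i)
--                 starts.append(i + 1)
--             elif para[i:i + 4] == ": - ":
--                 ends.append(i + 2)
--                 starts.append(i + 2)
--                 i += 3
--                 continue
--             elif c == '\n':
--                 ends.append(i)
--                 starts.append(i + 1)
--             i += 1
--         ends.append(n)
--         out.extend(para[s:e] for s, e in zip(starts, ends))
--     return out
-- ===== Notes on version B (the rewrite author's own statement) =====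
-- stated objective: alternative
-- what changed: B replaces A's build-a-'\n'-marked-string-then-split pipeline by an index-based plan: one scan records cut positions (segment end, next start) and the segments are then emitted as contiguous slices of the original paragraph.
import Mathlib
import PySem

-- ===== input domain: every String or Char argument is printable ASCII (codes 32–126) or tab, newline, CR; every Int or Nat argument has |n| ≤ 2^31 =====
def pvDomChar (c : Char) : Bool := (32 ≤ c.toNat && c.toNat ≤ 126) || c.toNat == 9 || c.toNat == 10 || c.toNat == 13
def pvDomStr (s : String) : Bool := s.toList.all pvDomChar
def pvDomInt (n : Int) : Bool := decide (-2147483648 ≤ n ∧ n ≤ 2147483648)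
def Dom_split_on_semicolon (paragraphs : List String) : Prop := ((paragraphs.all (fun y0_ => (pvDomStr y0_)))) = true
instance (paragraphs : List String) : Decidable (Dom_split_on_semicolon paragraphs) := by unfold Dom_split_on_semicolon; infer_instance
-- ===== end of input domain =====

-- B replaces A's build-a-marked-string-then-split pipeline by an index-based plan:
-- one scan records the cut positions, the segments are then contiguous slices of the
-- original paragraph (objective: alternative).

-- ===== PORT A =====
-- the in_brackets update A's loop performs at the top of each iteration
def pvUpd (c : Char) (ib : Bool) : Bool :=
  if c = '(' then true else if c = ')' then false else ib

-- A's inner while loop: builds the marked character list of one paragraph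
-- (';' → '\n' outside brackets and not last, ": - " → ": \n-" with i += 3).
def pvALoop : List Char → Bool → List Char
  | [], _ => []
  | c :: rest, ib =>
    if c = ';' ∧ rest ≠ [] ∧ pvUpd c ib = false then
      '\n' :: pvALoop rest (pvUpd c ib)
    else if c = ':' ∧ rest.take 3 = [' ', '-', ' '] then
      -- para[i:i+4] == ": - ": append ": \n-", i += 3 (the final ' ' is reprocessed)
      ':' :: ' ' :: '\n' :: '-' :: pvALoop (rest.drop 2) (pvUpd c ib)
    else
      c :: pvALoop rest (pvUpd c ib)
termination_by l => l.length
decreasing_by all_goals (simp; try omega)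

def split_on_semicolon (paragraphs : List String) : List String :=
  let new_paragraphs : List (List Char) :=
    paragraphs.foldl (fun acc para => acc ++ [pvALoop para.toList false]) []
  -- second loop: for paragraph in new_paragraphs: for para in paragraph.split('\n'): append
  new_paragraphs.foldl
    (fun acc paragraph => acc ++ (PySem.Chars.splitOn paragraph ['\n']).map String.ofList) []

-- ===== PORT B =====
-- B's cut scan: walks the paragraph suffix keeping the absolute index i, and records,
-- for each separator, the pair (end of the current segment, start of the next one).
def pvCuts : List Char → Nat → Bool → List (Nat × Nat)
  | [], _, _ => []
  | c :: rest, i, ib =>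
    if c = ';' ∧ rest ≠ [] ∧ pvUpd c ib = false then
      (i, i + 1) :: pvCuts rest (i + 1) (pvUpd c ib)
    else if c = ':' ∧ rest.take 3 = [' ', '-', ' '] then
      -- ": - ": the current segment keeps ": ", the next one starts at the '-'
      (i + 2, i + 2) :: pvCuts (rest.drop 2) (i + 3) (pvUpd c ib)
    else if c = '\n' then
      (i, i + 1) :: pvCuts rest (i + 1) (pvUpd c ib)
    else
      pvCuts rest (i + 1) (pvUpd c ib)
termination_by l => l.length
decreasing_by all_goals (simp; try omega)

-- para[s:e] for 0 ≤ s ≤ e ≤ len(para): exact as (drop s).take (e - s)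
def pvSlice (para : List Char) (s e : Nat) : String :=
  String.ofList ((para.drop s).take (e - s))

-- zip(starts, ends) of the recorded cut positions, sliced out of the paragraph
def pvSegs (para : List Char) : List String :=
  let cuts := pvCuts para 0 false
  let starts := 0 :: cuts.map Prod.snd
  let ends := cuts.map Prod.fst ++ [para.length]
  (starts.zip ends).map (fun se => pvSlice para se.1 se.2)

def split_on_semicolon_alt (paragraphs : List String) : List String :=
  paragraphs.flatMap (fun para => pvSegs para.toList)

-- ===== PRECONDITION & SPEC =====
def Spec_split_on_semicolon (paragraphs : List String) (out : List String) : Prop := out = split_on_semicolon_alt paragraphs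
instance (paragraphs : List String) (out : List String) : Decidable (Spec_split_on_semicolon paragraphs out) := by unfold Spec_split_on_semicolon; infer_instance

-- ===== CLAIM (what is proved, stated in full; the proofs are below) =====
def Claim_equal_split_on_semicolon : Prop := ∀ (paragraphs : List String), Dom_split_on_semicolon paragraphs → Spec_split_on_semicolon paragraphs (split_on_semicolon paragraphs)

-- ===== LEMMAS AND PROOFS =====

-- proof-only middle form: the fused single pass emitting segments with a buffer
def pvBLoop : List Char → Bool → List Char → List String
  | [], _, buf => [String.ofList buf]
  | c :: rest, ib, buf =>
    if c = ';' ∧ rest ≠ [] ∧ pvUpd c ib = false then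
      String.ofList buf :: pvBLoop rest (pvUpd c ib) []
    else if c = ':' ∧ rest.take 3 = [' ', '-', ' '] then
      String.ofList (buf ++ [':', ' ']) :: pvBLoop (rest.drop 2) (pvUpd c ib) ['-']
    else if c = '\n' then
      String.ofList buf :: pvBLoop rest (pvUpd c ib) []
    else
      pvBLoop rest (pvUpd c ib) (buf ++ [c])
termination_by l => l.length
decreasing_by all_goals (simp; try omega)

-- A clean recursion computing s.split('\n') with an explicit forward buffer.
def pvSplitNl : List Char → List Char → List (List Char)
  | buf, [] => [buf]
  | buf, c :: r => if c = '\n' then buf :: pvSplitNl [] r else pvSplitNl (buf ++ [c]) r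

theorem splitOn_go_eq (l : List Char) : ∀ (fuel : Nat) (cur : List Char) (acc : List (List Char)),
    l.length ≤ fuel →
    PySem.Chars.splitOn.go ['\n'] fuel l cur acc = acc.reverse ++ pvSplitNl cur.reverse l := by
  induction l with
  | nil =>
    intro fuel cur acc _
    cases fuel <;> simp [PySem.Chars.splitOn.go, pvSplitNl]
  | cons c rest ih =>
    intro fuel cur acc hf
    cases fuel with
    | zero => simp at hf
    | succ f =>
      by_cases hc : c = '\n'
      · subst hc
        rw [PySem.Chars.splitOn.go]
        simp [List.isPrefixOf, pvSplitNl, ih f [] (cur.reverse :: acc) (by simpa using hf)]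
      · rw [PySem.Chars.splitOn.go]
        have hpre : (['\n'].isPrefixOf (c :: rest)) = false := by
          simp [List.isPrefixOf]
          exact fun h => (hc h.symm).elim
        rw [hpre]
        simp only [Bool.false_eq_true, if_false]
        rw [ih f (c :: cur) acc (by simpa using Nat.le_of_succ_le_succ hf)]
        simp [pvSplitNl, hc]

theorem splitOn_eq_pvSplitNl (l : List Char) :
    PySem.Chars.splitOn l ['\n'] = pvSplitNl [] l := by
  unfold PySem.Chars.splitOn
  rw [splitOn_go_eq l (l.length + 1) [] [] (by omega)]
  simp

-- A-side invariant: splitting A's marked output of one paragraph, continuing a pending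
-- buffer, yields exactly the segments the fused pass emits from the same state.
theorem pvSplit_aLoop_eq_bLoop (l : List Char) (ib : Bool) : ∀ (buf : List Char),
    (pvSplitNl buf (pvALoop l ib)).map String.ofList = pvBLoop l ib buf := by
  induction l, ib using pvALoop.induct with
  | case1 ib =>
    intro buf; simp [pvALoop, pvBLoop, pvSplitNl]
  | case2 c rest ib h ih =>
    intro buf
    rw [pvALoop, pvBLoop, if_pos h, if_pos h]
    simp [pvSplitNl, ih]
  | case3 c rest ib h1 h2 ih =>
    intro buf
    rw [pvALoop, pvBLoop, if_neg h1, if_pos h2, if_neg h1, if_pos h2]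
    simp [pvSplitNl, ih]
  | case4 c rest ib h1 h2 ih =>
    intro buf
    rw [pvALoop, pvBLoop, if_neg h1, if_neg h2, if_neg h1, if_neg h2]
    by_cases hc : c = '\n'
    · subst hc; simp [pvSplitNl, ih]
    · rw [if_neg hc]
      simp [pvSplitNl, hc, ih]

-- B-side: assembling zip(starts, ends) slices, written as a recursion on the cut list
def pvAssemble (para : List Char) (s : Nat) : List (Nat × Nat) → List String
  | [] => [pvSlice para s para.length]
  | (e, s') :: rest => pvSlice para s e :: pvAssemble para s' rest

theorem pvSegs_eq_assemble_aux (para : List Char) (cuts : List (Nat × Nat)) :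
    ∀ (s : Nat),
      ((s :: cuts.map Prod.snd).zip (cuts.map Prod.fst ++ [para.length])).map
        (fun se => pvSlice para se.1 se.2) = pvAssemble para s cuts := by
  induction cuts with
  | nil => intro s; simp [pvAssemble]
  | cons p rest ih =>
    intro s
    obtain ⟨e, s'⟩ := p
    simp [pvAssemble, ← ih s']

theorem pvSegs_eq_assemble (para : List Char) :
    pvSegs para = pvAssemble para 0 (pvCuts para 0 false) := by
  unfold pvSegs
  exact pvSegs_eq_assemble_aux para (pvCuts para 0 false) 0

-- Core invariant: slicing along the recorded cuts, with s the start of the pending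
-- segment (buf = para[s:i]), reproduces the fused pass's segments.
theorem pvAssemble_cuts_eq_bLoop (l : List Char) (i : Nat) (ib : Bool) :
    ∀ (para : List Char) (s : Nat), para.drop i = l → s ≤ i →
      pvAssemble para s (pvCuts l i ib) = pvBLoop l ib ((para.drop s).take (i - s)) := by
  induction l, i, ib using pvCuts.induct with
  | case1 i ib =>
    intro para s hdrop hs
    have hlen : para.length ≤ i := by
      by_contra h
      have := List.drop_eq_nil_iff.mp hdrop
      omega
    have h1 : (para.drop s).take (para.length - s) = para.drop s := by
      apply List.take_of_length_le; simp
    have h2 : (para.drop s).take (i - s) = para.drop s := by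
      apply List.take_of_length_le; simp; omega
    simp [pvCuts, pvAssemble, pvBLoop, pvSlice, h1, h2]
  | case2 c rest i ib h ih =>
    intro para s hdrop hs
    have hdrop1 : para.drop (i + 1) = rest := by
      have : (para.drop i).drop 1 = rest := by rw [hdrop]; simp
      simpa [List.drop_drop, Nat.add_comm] using this
    have hbuf : (para.drop s).take (i - s) = (para.drop s).take (i - s) := rfl
    rw [pvCuts, if_pos h, pvBLoop, if_pos h, pvAssemble]
    rw [ih para (i + 1) hdrop1 (by omega)]
    simp [pvSlice]
  | case3 c rest i ib h1 h2 ih =>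
    intro para s hdrop hs
    -- rest = ' ' :: '-' :: ' ' :: rest'
    obtain ⟨hc, htake⟩ := h2
    subst hc
    obtain ⟨rest', hrest⟩ : ∃ rest', rest = ' ' :: '-' :: ' ' :: rest' := by
      match rest, htake with
      | a :: b :: d :: t, h =>
        simp [List.take] at h
        exact ⟨t, by simp [h.1, h.2.1, h.2.2]⟩
    subst hrest
    have hdi : para.drop i = ':' :: ' ' :: '-' :: ' ' :: rest' := hdrop
    have hd2 : para.drop (i + 2) = '-' :: ' ' :: rest' := by
      have : (para.drop i).drop 2 = '-' :: ' ' :: rest' := by rw [hdi]; simp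
      simpa [List.drop_drop, Nat.add_comm] using this
    have hd3 : para.drop (i + 3) = ' ' :: rest' := by
      have : (para.drop i).drop 3 = ' ' :: rest' := by rw [hdi]; simp
      simpa [List.drop_drop, Nat.add_comm] using this
    have h2' : (':' : Char) = ':' ∧ List.take 3 (' ' :: '-' :: ' ' :: rest') = [' ', '-', ' '] :=
      ⟨rfl, htake⟩
    rw [pvCuts, if_neg h1, if_pos h2', pvBLoop, if_neg h1, if_pos h2', pvAssemble]
    rw [ih para (i + 2) hd3 (by omega)]
    have hseg : (para.drop s).take (i + 2 - s) = (para.drop s).take (i - s) ++ [':', ' '] := by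
      have he : i + 2 - s = (i - s) + 2 := by omega
      have hds : (para.drop s).drop (i - s) = para.drop i := by
        rw [List.drop_drop]; congr 1; omega
      rw [he, List.take_add, hds, hdi]
      rfl
    have hbuf2 : (para.drop (i + 2)).take (i + 3 - (i + 2)) = ['-'] := by
      have he1 : i + 3 - (i + 2) = 1 := by omega
      rw [hd2, he1]; rfl
    simp only [pvSlice, hseg]
    rw [hbuf2]
  | case4 rest i ib h1 h2 ih =>
    intro para s hdrop hs
    have hdrop1 : para.drop (i + 1) = rest := by
      have : (para.drop i).drop 1 = rest := by rw [hdrop]; simp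
      simpa [List.drop_drop, Nat.add_comm] using this
    rw [pvCuts, if_neg h1, if_neg h2, if_pos rfl, pvBLoop, if_neg h1, if_neg h2, if_pos rfl,
        pvAssemble]
    rw [ih para (i + 1) hdrop1 (by omega)]
    simp [pvSlice]
  | case5 c rest i ib h1 h2 h3 ih =>
    intro para s hdrop hs
    have hdrop1 : para.drop (i + 1) = rest := by
      have : (para.drop i).drop 1 = rest := by rw [hdrop]; simp
      simpa [List.drop_drop, Nat.add_comm] using this
    rw [pvCuts, if_neg h1, if_neg h2, if_neg h3, pvBLoop, if_neg h1, if_neg h2, if_neg h3]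
    rw [ih para s hdrop1 (by omega)]
    have hgrow : (para.drop s).take (i + 1 - s) = (para.drop s).take (i - s) ++ [c] := by
      have he : i + 1 - s = (i - s) + 1 := by omega
      have hds : (para.drop s).drop (i - s) = para.drop i := by
        rw [List.drop_drop]; congr 1; omega
      rw [he, List.take_add, hds, hdrop]
      rfl
    rw [hgrow]

theorem pvSegs_eq_bLoop (para : List Char) :
    pvSegs para = pvBLoop para false [] := by
  rw [pvSegs_eq_assemble, pvAssemble_cuts_eq_bLoop para 0 false para 0 rfl (le_refl 0)]
  simp

-- a foldl that only appends is a flatMap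
theorem pvFoldl_append_flatMap {α β : Type} (f : α → List β) (l : List α) :
    ∀ (acc : List β), l.foldl (fun a x => a ++ f x) acc = acc ++ l.flatMap f := by
  induction l with
  | nil => intro acc; simp
  | cons x xs ih => intro acc; simp [List.foldl_cons, ih, List.flatMap_cons]

theorem pvFlatMap_singleton_map {α β : Type} (f : α → β) (l : List α) :
    l.flatMap (fun x => [f x]) = l.map f := by
  induction l <;> simp_all

theorem pvPerPara (p : String) :
    (PySem.Chars.splitOn (pvALoop p.toList false) ['\n']).map String.ofList
      = pvSegs p.toList := by
  rw [splitOn_eq_pvSplitNl, pvSegs_eq_bLoop]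
  exact pvSplit_aLoop_eq_bLoop p.toList false []

-- ===== VERDICT (by name: the statement is the Claim_ definition above) =====
theorem split_on_semicolon_spec : Claim_equal_split_on_semicolon := by
  intro paragraphs _
  unfold Spec_split_on_semicolon split_on_semicolon split_on_semicolon_alt
  rw [pvFoldl_append_flatMap (fun para => [pvALoop para.toList false]) paragraphs [],
      pvFoldl_append_flatMap (fun paragraph => (PySem.Chars.splitOn paragraph ['\n']).map String.ofList)]
  rw [pvFlatMap_singleton_map (fun para => pvALoop para.toList false) paragraphs]
  simp only [List.nil_append, List.flatMap_map, pvPerPara]
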